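-- pv_equiv track=rewrite | github.com/avielchow/Codejam | Cryptopangrams.py | semiprime9
-- ===== SOURCE A (Python) =====
-- def semiprime9(start,prime):
--
--     primes1 = [x for x in prime if x%10 == 1]
--     primes3 = [x for x in prime if x%10 == 3]
--     primes7 = [x for x in prime if x%10 == 7]
--     primes9 = [x for x in prime if x%10 == 9]
--
--     for x in primes7:
--         for y in primes7:
--             if x*y == start:
--                 return x,y
--
--     for x in primes9:
--         for y in primes1:
--             if x*y == start:
--                 return x,y
--
--     for x in primes3:
--         for y in primes3:
--             if x*y == start:
--                 return x,y
-- ===== SOURCE B (Python) =====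
-- def semiprime9(start, prime):
--     s1 = {x for x in prime if x % 10 == 1}
--     s3 = {x for x in prime if x % 10 == 3}
--     s7 = {x for x in prime if x % 10 == 7}
--     for x in prime:
--         if x % 10 == 7 and start % x == 0 and start // x in s7:
--             return x, start // x
--     for x in prime:
--         if x % 10 == 9 and start % x == 0 and start // x in s1:
--             return x, start // x
--     for x in prime:
--         if x % 10 == 3 and start % x == 0 and start // x in s3:
--             return x, start // x
-- ===== Notes on version B (the rewrite author's own statement) =====
-- stated objective: faster
-- what changed: Replaced the nested quadratic scans for a factor pair by hash sets of each last-digit group and a single divisor lookup start//x per candidate x.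
import Mathlib
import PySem

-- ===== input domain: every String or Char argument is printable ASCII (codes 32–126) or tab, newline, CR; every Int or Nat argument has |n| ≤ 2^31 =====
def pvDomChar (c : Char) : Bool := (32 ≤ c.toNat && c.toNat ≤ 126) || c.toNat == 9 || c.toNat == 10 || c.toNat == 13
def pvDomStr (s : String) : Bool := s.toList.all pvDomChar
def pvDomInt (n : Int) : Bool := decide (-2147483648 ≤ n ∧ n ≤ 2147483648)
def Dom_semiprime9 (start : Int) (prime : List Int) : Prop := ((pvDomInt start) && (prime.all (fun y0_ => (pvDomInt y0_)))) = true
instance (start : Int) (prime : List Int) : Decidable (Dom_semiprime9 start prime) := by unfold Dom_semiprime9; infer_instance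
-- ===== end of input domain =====

-- B replaces A's quadratic nested scans by per-last-digit sets and one divisor lookup start//x per x (objective: faster).

-- ===== PORT A =====
-- inner 'for y in ys: if x*y == start: return x,y'
def pvInnerA (start x : Int) : List Int → Option (List Int)
  | [] => none
  | y :: ys => if x * y = start then some [x, y] else pvInnerA start x ys

-- outer 'for x in xs: <inner over ys>'
def pvOuterA (start : Int) (ys : List Int) : List Int → Option (List Int)
  | [] => none
  | x :: xs =>
    match pvInnerA start x ys with
    | some r => some r
    | none => pvOuterA start ys xs

def semiprime9 (start : Int) (prime : List Int) : Option (List Int) :=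
  let primes1 := prime.filter (fun x => PySem.Int.mod x 10 == 1)
  let primes3 := prime.filter (fun x => PySem.Int.mod x 10 == 3)
  let primes7 := prime.filter (fun x => PySem.Int.mod x 10 == 7)
  let primes9 := prime.filter (fun x => PySem.Int.mod x 10 == 9)
  match pvOuterA start primes7 primes7 with
  | some r => some r
  | none =>
    match pvOuterA start primes1 primes9 with
    | some r => some r
    | none => pvOuterA start primes3 primes3

-- ===== PORT B =====
-- 'for x in prime: if x%10 == r and start % x == 0 and start//x in s: return x, start//x'
def pvScanB (start r : Int) (s : PySem.Set Int) : List Int → Option (List Int)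
  | [] => none
  | x :: xs =>
    if PySem.Int.mod x 10 = r ∧ PySem.Int.mod start x = 0 ∧
        PySem.Set.contains s (PySem.Int.floordiv start x) = true
    then some [x, PySem.Int.floordiv start x]
    else pvScanB start r s xs

def semiprime9_alt (start : Int) (prime : List Int) : Option (List Int) :=
  let s1 := PySem.Set.ofList (prime.filter (fun x => PySem.Int.mod x 10 == 1))
  let s3 := PySem.Set.ofList (prime.filter (fun x => PySem.Int.mod x 10 == 3))
  let s7 := PySem.Set.ofList (prime.filter (fun x => PySem.Int.mod x 10 == 7))
  match pvScanB start 7 s7 prime with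
  | some r => some r
  | none =>
    match pvScanB start 9 s1 prime with
    | some r => some r
    | none => pvScanB start 3 s3 prime

-- ===== PRECONDITION & SPEC =====
def Spec_semiprime9 (start : Int) (prime : List Int) (out : Option (List Int)) : Prop := out = semiprime9_alt start prime
instance (start : Int) (prime : List Int) (out : Option (List Int)) : Decidable (Spec_semiprime9 start prime out) := by unfold Spec_semiprime9; infer_instance

-- ===== CLAIM (what is proved, stated in full; the proofs are below) =====
def Claim_equal_semiprime9 : Prop := ∀ (start : Int) (prime : List Int), Dom_semiprime9 start prime → Spec_semiprime9 start prime (semiprime9 start prime)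

-- ===== LEMMAS AND PROOFS =====

-- x*y = start has (for x ≠ 0) the unique solution y = start // x, and exactly when x divides start
theorem pvMulEqIff (start x y : Int) (hx : x ≠ 0) :
    x * y = start ↔ (PySem.Int.mod start x = 0 ∧ PySem.Int.floordiv start x = y) := by
  constructor
  · intro h
    have hm : PySem.Int.mod start x = 0 :=
      (PySem.Int.mod_eq_zero_iff_dvd start x).mpr ⟨y, h.symm⟩
    have hf := PySem.Int.floordiv_mul_add_mod start x
    rw [hm, add_zero] at hf
    refine ⟨hm, mul_right_cancel₀ hx ?_⟩
    rw [hf, ← h]; ring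
  · rintro ⟨hm, hf⟩
    have h := PySem.Int.floordiv_mul_add_mod start x
    rw [hm, add_zero, hf] at h
    linarith [h, mul_comm x y]

-- the inner scan of A, characterised by divisibility + membership of the quotient
theorem pvInnerA_eq (start x : Int) (hx : x ≠ 0) (ys : List Int) :
    pvInnerA start x ys =
      (if PySem.Int.mod start x = 0 ∧ PySem.Int.floordiv start x ∈ ys
       then some [x, PySem.Int.floordiv start x] else none) := by
  induction ys with
  | nil => simp [pvInnerA]
  | cons y ys ih =>
    by_cases h : x * y = start
    · obtain ⟨hm, hf⟩ := (pvMulEqIff start x y hx).mp h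
      simp [pvInnerA, h, hm, hf]
    · have h' : ¬ (PySem.Int.mod start x = 0 ∧ PySem.Int.floordiv start x = y) := by
        intro hc; exact h ((pvMulEqIff start x y hx).mpr hc)
      simp only [pvInnerA, if_neg h, ih, List.mem_cons]
      by_cases hm : PySem.Int.mod start x = 0
      · by_cases hmem : PySem.Int.floordiv start x ∈ ys
        · simp [hm, hmem]
        · have : PySem.Int.floordiv start x ≠ y := fun he => h' ⟨hm, he⟩
          simp [hm, hmem, this]
      · simp [hm]

-- B's scan over the whole list equals A's outer scan over the filtered list
theorem pvScanB_eq (start r : Int) (hr : ∀ x : Int, PySem.Int.mod x 10 = r → x ≠ 0)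
    (s ys : List Int) (hs : ∀ q : Int, q ∈ s ↔ q ∈ ys) (xs : List Int) :
    pvScanB start r s xs =
      pvOuterA start ys (xs.filter (fun x => PySem.Int.mod x 10 == r)) := by
  induction xs with
  | nil => simp [pvScanB, pvOuterA]
  | cons x xs ih =>
    by_cases hx : PySem.Int.mod x 10 = r
    · have hx0 : x ≠ 0 := hr x hx
      have hcont : (PySem.Set.contains s (PySem.Int.floordiv start x) = true)
          ↔ PySem.Int.floordiv start x ∈ ys := by
        rw [PySem.Set.contains_iff]; exact hs _
      have hx' : x % 10 = r := by
        rw [← PySem.Int.mod_eq_emod_of_pos (by norm_num : (0:Int) < 10)]; exact hx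
      have hfilter : (x :: xs).filter (fun x => PySem.Int.mod x 10 == r)
          = x :: xs.filter (fun x => PySem.Int.mod x 10 == r) := by
        simp [List.filter_cons, hx']
      rw [hfilter]
      simp only [pvScanB, pvOuterA, pvInnerA_eq start x hx0 ys]
      by_cases hm : PySem.Int.mod start x = 0 ∧ PySem.Int.floordiv start x ∈ ys
      · rw [if_pos ⟨hx, hm.1, hcont.mpr hm.2⟩, if_pos hm]
      · have h1 : ¬ (PySem.Int.mod x 10 = r ∧ PySem.Int.mod start x = 0 ∧
            PySem.Set.contains s (PySem.Int.floordiv start x) = true) := by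
          rintro ⟨_, h2, h3⟩; exact hm ⟨h2, hcont.mp h3⟩
        rw [if_neg h1, if_neg hm, ih]
    · have hxb : (PySem.Int.mod x 10 == r) = false := by simpa using hx
      have hx' : ¬ x % 10 = r := by
        rw [← PySem.Int.mod_eq_emod_of_pos (by norm_num : (0:Int) < 10)]; exact hx
      have hfilter : (x :: xs).filter (fun x => PySem.Int.mod x 10 == r)
          = xs.filter (fun x => PySem.Int.mod x 10 == r) := by
        simp [List.filter_cons, hx']
      rw [hfilter]
      simp only [pvScanB]
      rw [if_neg (by rintro ⟨h1, _⟩; exact hx h1), ih]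

theorem pvMod10_ne_zero (r : Int) (hr : r ≠ 0) : ∀ x : Int, PySem.Int.mod x 10 = r → x ≠ 0 := by
  intro x h h0
  subst h0
  apply hr
  rw [← h]
  decide

-- ===== VERDICT (by name: the statement is the Claim_ definition above) =====
theorem semiprime9_spec : Claim_equal_semiprime9 := by
  intro start prime _
  unfold Spec_semiprime9
  simp only [semiprime9, semiprime9_alt]
  rw [pvScanB_eq start 7 (pvMod10_ne_zero 7 (by decide))
        (PySem.Set.ofList (prime.filter (fun x => PySem.Int.mod x 10 == 7)))
        (prime.filter (fun x => PySem.Int.mod x 10 == 7))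
        (fun q => PySem.Set.mem_ofList _ q) prime,
      pvScanB_eq start 9 (pvMod10_ne_zero 9 (by decide))
        (PySem.Set.ofList (prime.filter (fun x => PySem.Int.mod x 10 == 1)))
        (prime.filter (fun x => PySem.Int.mod x 10 == 1))
        (fun q => PySem.Set.mem_ofList _ q) prime,
      pvScanB_eq start 3 (pvMod10_ne_zero 3 (by decide))
        (PySem.Set.ofList (prime.filter (fun x => PySem.Int.mod x 10 == 3)))
        (prime.filter (fun x => PySem.Int.mod x 10 == 3))
        (fun q => PySem.Set.mem_ofList _ q) prime]
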